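-- pv_equiv track=rewrite | github.com/eliasdjup/INF237 | Graphs1/MM_alt.py | calc
-- ===== SOURCE A (Python) =====
-- def calc(graph, dept, friends_num):
--     visited = set()
--
--     for friend in range(friends_num):
--         if friend in visited:
--             continue
--
--         if friend not in graph.keys():
--             if dept[friend] != 0:
--                 return False
--             continue
--
--
--         component_sum = 0
--         stack = [friend]
--         while len(stack) != 0:
--             current = stack.pop()
--
--             if current in visited:
--                 continue
--
--             visited.add(current)
--             component_sum += dept[current]
--
--             for neighbour in graph[current]:
--                 if neighbour not in visited:
--                     stack.append(neighbour)
--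
--         if component_sum != 0:
--             return False
--
--     return True
-- ===== SOURCE B (Python) =====
-- def calc(graph, dept, friends_num):
--     visited = set()
--     for friend in range(friends_num):
--         if friend in visited:
--             continue
--         if friend not in graph:
--             if dept[friend] != 0:
--                 return False
--             continue
--         comp = set()
--         frontier = {friend}
--         while frontier:
--             comp |= frontier
--             frontier = {v for u in frontier for v in graph[u]
--                         if v not in comp and v not in visited}
--         if sum(dept[u] for u in comp) != 0:
--             return False
--         visited |= comp
--     return True
-- ===== Notes on version B (the rewrite author's own statement) =====
-- stated objective: alternative
-- what changed: The per-component stack DFS with pop-time visited checks and an incremental running sum is replaced by a frontier-set fixpoint (level-wise BFS with set union/difference) that collects the whole component as a set and sums its debts once at the end.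
-- outside the precondition, e.g. on calc({5: [7]}, [0, 1], 2): A returns False, B returns False; on calc({0: []}, [1, 2], 3): A returns False, B returns False
import Mathlib
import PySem

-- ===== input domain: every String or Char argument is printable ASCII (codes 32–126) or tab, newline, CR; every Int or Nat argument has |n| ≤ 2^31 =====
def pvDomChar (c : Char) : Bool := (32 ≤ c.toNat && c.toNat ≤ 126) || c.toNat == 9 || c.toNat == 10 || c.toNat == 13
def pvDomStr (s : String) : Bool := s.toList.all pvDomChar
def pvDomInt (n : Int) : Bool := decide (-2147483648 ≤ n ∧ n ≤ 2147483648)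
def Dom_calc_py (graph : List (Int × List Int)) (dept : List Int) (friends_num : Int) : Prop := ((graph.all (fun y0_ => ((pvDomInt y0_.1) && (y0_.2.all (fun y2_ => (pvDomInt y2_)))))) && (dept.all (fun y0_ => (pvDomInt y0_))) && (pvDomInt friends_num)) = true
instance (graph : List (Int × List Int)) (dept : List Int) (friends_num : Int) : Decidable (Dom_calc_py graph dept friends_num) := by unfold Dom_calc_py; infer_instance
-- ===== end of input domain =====

-- B replaces A's per-component stack DFS (pop-time visited checks, incremental sum) by a
-- frontier-set fixpoint (level-wise BFS with set union/difference) that sums the component once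
-- at the end; same return value (alternative decomposition, no speed claim).

-- ===== shared helpers (both Pythons index the same dict `graph` and list `dept`) =====

/-- All node ids mentioned by the graph (keys and neighbours). Used only as a finite
universe for termination and invariants. -/
def pvNodes (g : List (Int × List Int)) : List Int :=
  g.foldr (fun p acc => p.1 :: (p.2 ++ acc)) []

/-- Total number of adjacency entries. -/
def pvEdges (g : List (Int × List Int)) : Nat := (g.map (fun p => p.2.length)).sum

/-- `graph[u]` — exact where Python returns (Pre_ guarantees the key exists wherever accessed). -/
def pvAdj (g : List (Int × List Int)) (u : Int) : List Int :=
  ((PySem.Dict.mk g).get? u).getD []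

/-- `dept[u]` — exact where Python returns (Pre_ guarantees the index is in range, nonnegative). -/
def pvDept (dept : List Int) (u : Int) : Int := (PySem.List.pyGet? dept u).getD 0

lemma mem_pvNodes (g : List (Int × List Int)) (x : Int) :
    x ∈ pvNodes g ↔ ∃ p ∈ g, x = p.1 ∨ x ∈ p.2 := by
  induction g with
  | nil => simp [pvNodes]
  | cons a g ih => simp [pvNodes] at ih ⊢; aesop

lemma pvDictGet_mem (g : List (Int × List Int)) (u : Int) (l : List Int)
    (h : (PySem.Dict.mk g).get? u = some l) : (u, l) ∈ g := by
  induction g with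
  | nil => simp [PySem.Dict.get?] at h
  | cons a g ih =>
    rcases a with ⟨k, v⟩
    rw [PySem.Dict.get?_mk_cons] at h
    by_cases hk : k = u
    · subst hk; simp at h; simp [h]
    · simp [show (k == u) = false by simp [hk]] at h
      exact List.mem_cons_of_mem _ (ih h)

lemma pvAdj_mem_nodes (g : List (Int × List Int)) (u x : Int)
    (h : x ∈ pvAdj g u) : x ∈ pvNodes g := by
  unfold pvAdj at h
  cases hg : (PySem.Dict.mk g).get? u with
  | none => rw [hg] at h; simp at h
  | some l =>
    rw [hg] at h; simp at h
    exact (mem_pvNodes g x).mpr ⟨(u, l), pvDictGet_mem g u l hg, Or.inr h⟩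

lemma pvAdj_length_le (g : List (Int × List Int)) (u : Int) :
    (pvAdj g u).length ≤ pvEdges g := by
  unfold pvAdj
  cases hg : (PySem.Dict.mk g).get? u with
  | none => simp
  | some l =>
    have := pvDictGet_mem g u l hg
    simp only [Option.getD_some]
    exact List.single_le_sum (by simp) _ (List.mem_map.mpr ⟨(u, l), this, rfl⟩)

lemma pvKey_mem_nodes (g : List (Int × List Int)) (u : Int)
    (h : (PySem.Dict.mk g).contains u) : u ∈ pvNodes g := by
  rw [PySem.Dict.contains_eq_isSome_get?] at h
  cases hg : (PySem.Dict.mk g).get? u with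
  | none => rw [hg] at h; simp at h
  | some l => exact (mem_pvNodes g u).mpr ⟨(u, l), pvDictGet_mem g u l hg, Or.inl rfl⟩

lemma pvNotMem (s : PySem.Set Int) (x : Int) : s.contains x = false ↔ x ∉ s := by
  rw [← PySem.Set.contains_iff]; cases s.contains x <;> simp

lemma pvFilter_le (U : List Int) (p q : Int → Bool)
    (himp : ∀ x, q x = true → p x = true) :
    (U.filter q).length ≤ (U.filter p).length := by
  induction U with
  | nil => simp
  | cons a U ih =>
    cases hqa : q a with
    | true => simp [hqa, himp a hqa]; omega
    | false =>
      cases hpa : p a <;> simp [hqa, hpa] <;> omega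

lemma pvFilter_lt (U : List Int) (p q : Int → Bool)
    (himp : ∀ x, q x = true → p x = true)
    (c : Int) (hc : c ∈ U) (hp : p c = true) (hq : q c = false) :
    (U.filter q).length < (U.filter p).length := by
  induction U with
  | nil => cases hc
  | cons a U ih =>
    by_cases hac : a = c
    · subst hac
      simp [hp, hq]
      exact pvFilter_le U p q himp
    · have hcU : c ∈ U := by
        rcases List.mem_cons.mp hc with h | h
        · exact absurd h.symm hac
        · exact h
      cases hqa : q a with
      | true => simp [hqa, himp a hqa]; exact ih hcU
      | false =>
        cases hpa : p a <;> simp [hqa, hpa]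
        · exact ih hcU
        · exact Nat.le_of_lt (ih hcU)

-- ===== PORT A =====
-- A's inner `while stack:` loop: pop, skip visited, add dept, push unvisited neighbours.
-- Stack top is the list head (Python appends/pops at the end, hence `.reverse` on the pushes);
-- the hypothesis argument only makes the recursion well-founded, it computes nothing.
def calcDfs (g : List (Int × List Int)) (dept : List Int) (visited : PySem.Set Int)
    (stack : List Int) (csum : Int) (hS : ∀ x ∈ stack, x ∈ pvNodes g) :
    PySem.Set Int × Int :=
  match stack with
  | [] => (visited, csum)
  | current :: rest =>
    if h : visited.contains current then
      calcDfs g dept visited rest csum (fun x hx => hS x (List.mem_cons_of_mem _ hx))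
    else
      calcDfs g dept (visited.add current)
        (((pvAdj g current).filter (fun n => !(visited.add current).contains n)).reverse ++ rest)
        (csum + pvDept dept current)
        (fun x hx => by
          rcases List.mem_append.mp hx with h' | h'
          · exact pvAdj_mem_nodes g current x (List.mem_of_mem_filter (List.mem_reverse.mp h'))
          · exact hS x (List.mem_cons_of_mem _ h'))
termination_by
  ((pvNodes g).dedup.filter (fun x => !visited.contains x)).length * (pvEdges g + 1) + stack.length
decreasing_by
  · have : (current :: rest).length = rest.length + 1 := List.length_cons
    omega
  · have hcn : current ∈ (pvNodes g).dedup :=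
      List.mem_dedup.mpr (hS current List.mem_cons_self)
    have h1 : (((pvNodes g).dedup.filter (fun x => !(visited.add current).contains x)).length)
        < (((pvNodes g).dedup.filter (fun x => !visited.contains x)).length) := by
      refine pvFilter_lt _ _ _ ?_ current hcn ?_ ?_
      · intro x hx
        have hx' : (!(visited.add current).contains x) = true := hx
        show (!visited.contains x) = true
        rw [Bool.not_eq_true'] at hx' ⊢
        rw [pvNotMem] at hx' ⊢
        exact fun hm => hx' ((PySem.Set.mem_add _ _ _).mpr (Or.inl hm))
      · show (!visited.contains current) = true
        rw [Bool.not_eq_true', pvNotMem, ← PySem.Set.contains_iff]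
        exact h
      · show (!(visited.add current).contains current) = false
        simp [PySem.Set.mem_add]
    have h2 : (((pvAdj g current).filter (fun n => !(visited.add current).contains n)).reverse).length
        ≤ pvEdges g := by
      rw [List.length_reverse]
      exact le_trans (List.length_filter_le _ _) (pvAdj_length_le g current)
    have h4 : (((pvNodes g).dedup.filter (fun x => !(visited.add current).contains x)).length + 1)
        * (pvEdges g + 1)
        = ((pvNodes g).dedup.filter (fun x => !(visited.add current).contains x)).length
          * (pvEdges g + 1) + (pvEdges g + 1) := by ring
    have h3 : (((pvNodes g).dedup.filter (fun x => !(visited.add current).contains x)).length + 1)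
        * (pvEdges g + 1)
        ≤ (((pvNodes g).dedup.filter (fun x => !visited.contains x)).length) * (pvEdges g + 1) :=
      Nat.mul_le_mul_right _ h1
    simp only [List.length_append, List.length_cons]
    omega

-- A's outer `for friend in range(friends_num)` loop; Python tests `friend not in graph`
-- first and continues — here the same two branches in if/else form.
def calcLoop (g : List (Int × List Int)) (dept : List Int)
    (friends : List Int) (visited : PySem.Set Int) : Bool :=
  match friends with
  | [] => true
  | f :: fs =>
    if visited.contains f then calcLoop g dept fs visited
    else if h : (PySem.Dict.mk g).contains f then
      let r := calcDfs g dept visited [f] 0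
        (fun x hx => by
          rw [List.mem_singleton] at hx; subst hx; exact pvKey_mem_nodes g _ h)
      if r.2 ≠ 0 then false else calcLoop g dept fs r.1
    else
      if pvDept dept f ≠ 0 then false else calcLoop g dept fs visited

def calc_py (graph : List (Int × List Int)) (dept : List Int) (friends_num : Int) : Bool :=
  calcLoop graph dept (PySem.List.pyRange 0 friends_num 1) PySem.Set.empty

-- ===== PORT B =====
-- B's inner `while frontier:` loop: absorb the frontier into the component, then expand it one
-- level through the adjacency lists, dropping anything already collected or previously visited.
def bfsLoop (g : List (Int × List Int)) (visited comp : PySem.Set Int)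
    (frontier : PySem.Set Int)
    (hF : ∀ x ∈ frontier, x ∈ pvNodes g) (hd : ∀ x ∈ frontier, x ∉ comp) :
    PySem.Set Int :=
  match frontier with
  | [] => comp
  | c :: rest =>
    bfsLoop g visited (PySem.Set.update comp (c :: rest))
      (PySem.Set.ofList (((c :: rest).flatMap (pvAdj g)).filter
        (fun v => !(PySem.Set.update comp (c :: rest)).contains v && !visited.contains v)))
      (fun x hx => by
        rcases List.mem_flatMap.mp (List.mem_of_mem_filter
          ((PySem.Set.mem_ofList _ _).mp hx)) with ⟨u, _, hu⟩
        exact pvAdj_mem_nodes g u x hu)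
      (fun x hx hmem => by
        have hp := List.of_mem_filter ((PySem.Set.mem_ofList _ _).mp hx)
        simp only [Bool.and_eq_true, Bool.not_eq_true'] at hp
        exact (pvNotMem _ _).mp hp.1 hmem)
termination_by ((pvNodes g).dedup.filter (fun x => !comp.contains x)).length
decreasing_by
  refine pvFilter_lt _ _ _ ?_ c (List.mem_dedup.mpr (hF c List.mem_cons_self)) ?_ ?_
  · intro x hx
    have hx' : (!(PySem.Set.update comp (c :: rest)).contains x) = true := hx
    show (!comp.contains x) = true
    rw [Bool.not_eq_true'] at hx' ⊢
    rw [pvNotMem] at hx' ⊢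
    exact fun hm => hx' ((PySem.Set.mem_update _ _ _).mpr (Or.inl hm))
  · show (!comp.contains c) = true
    rw [Bool.not_eq_true', pvNotMem]
    exact hd c List.mem_cons_self
  · show (!(PySem.Set.update comp (c :: rest)).contains c) = false
    simp [PySem.Set.mem_update]

-- B's outer loop: same per-friend shape as the Python, but the component is a set whose
-- debts are summed once, and the visited set is updated wholesale.
def calcLoopB (g : List (Int × List Int)) (dept : List Int)
    (friends : List Int) (visited : PySem.Set Int) : Bool :=
  match friends with
  | [] => true
  | f :: fs =>
    if visited.contains f then calcLoopB g dept fs visited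
    else if h : (PySem.Dict.mk g).contains f then
      let comp := bfsLoop g visited PySem.Set.empty (PySem.Set.ofList [f])
        (fun x hx => by
          rw [PySem.Set.mem_ofList, List.mem_singleton] at hx
          subst hx; exact pvKey_mem_nodes g _ h)
        (fun x _ hmem => (List.not_mem_nil) hmem)
      if (comp.map (pvDept dept)).sum ≠ 0 then false
      else calcLoopB g dept fs (PySem.Set.update visited comp)
    else
      if pvDept dept f ≠ 0 then false else calcLoopB g dept fs visited

def calc_py_alt (graph : List (Int × List Int)) (dept : List Int) (friends_num : Int) : Bool :=
  calcLoopB graph dept (PySem.List.pyRange 0 friends_num 1) PySem.Set.empty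

-- ===== PRECONDITION & SPEC =====
-- Pre_ excludes the inputs on which Python A raises (IndexError/KeyError on a visited node)
-- and, being closed-form rather than execution-aware, also some inputs with out-of-range keys,
-- non-key neighbours or friends_num > len(dept) that A never reaches because it returns False
-- at an earlier friend (A returns there; see the cites): it admits a run that touches nothing
-- (friends_num ≤ 0), a well-formed graph (every accessed index in range, every neighbour a key),
-- or an immediate False at friend 0.
def Pre_calc_py (graph : List (Int × List Int)) (dept : List Int) (friends_num : Int) : Prop :=
  friends_num ≤ 0 ∨
  (friends_num ≤ (dept.length : Int) ∧
    (graph.map Prod.fst).Nodup ∧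
    ∀ p ∈ graph, (-(dept.length : Int) ≤ p.1 ∧ p.1 < (dept.length : Int)) ∧
      ∀ v ∈ p.2, v ∈ graph.map Prod.fst) ∨
  (1 ≤ friends_num ∧ dept ≠ [] ∧ (0 : Int) ∉ graph.map Prod.fst ∧ dept.headI ≠ 0)
instance (graph : List (Int × List Int)) (dept : List Int) (friends_num : Int) :
    Decidable (Pre_calc_py graph dept friends_num) := by unfold Pre_calc_py; infer_instance

def pvWitness_calc_py : (List (Int × List Int)) × List Int × Int :=
  ([(0, [1]), (1, [0])], [3, -3], 2)

def Spec_calc_py (graph : List (Int × List Int)) (dept : List Int) (friends_num : Int)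
    (out : Bool) : Prop := out = calc_py_alt graph dept friends_num
instance (graph : List (Int × List Int)) (dept : List Int) (friends_num : Int) (out : Bool) :
    Decidable (Spec_calc_py graph dept friends_num out) := by unfold Spec_calc_py; infer_instance

-- ===== CLAIM (what is proved, stated in full; the proofs are below) =====
def Claim_equal_calc_py : Prop := ∀ (graph : List (Int × List Int)) (dept : List Int) (friends_num : Int), Dom_calc_py graph dept friends_num → Pre_calc_py graph dept friends_num → Spec_calc_py graph dept friends_num (calc_py graph dept friends_num)

-- ===== LEMMAS AND PROOFS =====

/-- One step of traversal: `b` is a not-yet-visited neighbour of `a`. -/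
def pvStep (g : List (Int × List Int)) (V : Int → Bool) (a b : Int) : Prop :=
  V b = false ∧ b ∈ pvAdj g a

/-- `x` is reachable from an unvisited `s` along unvisited nodes. -/
def pvReach (g : List (Int × List Int)) (V : Int → Bool) (s x : Int) : Prop :=
  V s = false ∧ Relation.ReflTransGen (pvStep g V) s x

lemma pvReach_target (g : List (Int × List Int)) (V : Int → Bool) (s x : Int)
    (h : pvReach g V s x) : V x = false := by
  rcases h with ⟨hs, hr⟩
  induction hr with
  | refl => exact hs
  | tail _ hstep _ => exact hstep.1

lemma pvReach_mono (g : List (Int × List Int)) (V W : Int → Bool)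
    (hVW : ∀ x, W x = false → V x = false) (s x : Int)
    (h : pvReach g W s x) : pvReach g V s x := by
  rcases h with ⟨hs, hr⟩
  exact ⟨hVW s hs, Relation.ReflTransGen.mono (fun a b hab => ⟨hVW b hab.1, hab.2⟩) hr⟩

lemma pvReach_head (g : List (Int × List Int)) (V : Int → Bool) (c n x : Int)
    (hc : V c = false) (hn : n ∈ pvAdj g c) (h : pvReach g V n x) : pvReach g V c x :=
  ⟨hc, Relation.ReflTransGen.head ⟨h.1, hn⟩ h.2⟩

lemma pvContains_add_true (V : PySem.Set Int) (c x : Int) :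
    (V.add c).contains x = true ↔ V.contains x = true ∨ x = c := by
  rw [PySem.Set.contains_iff, PySem.Set.mem_add, PySem.Set.contains_iff]

lemma pvContains_add_false (V : PySem.Set Int) (c x : Int) :
    (V.add c).contains x = false ↔ V.contains x = false ∧ x ≠ c := by
  constructor
  · intro h
    have hnot : ¬ ((V.add c).contains x = true) := by rw [h]; exact Bool.false_ne_true
    refine ⟨?_, ?_⟩
    · cases hv : V.contains x
      · rfl
      · exact absurd ((pvContains_add_true V c x).mpr (Or.inl hv)) hnot
    · intro hx
      exact hnot ((pvContains_add_true V c x).mpr (Or.inr hx))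
  · rintro ⟨h1, h2⟩
    cases hv : (V.add c).contains x
    · rfl
    · rcases (pvContains_add_true V c x).mp hv with h | h
      · rw [h1] at h; cases h
      · exact absurd h h2

lemma pvFilterMem (V : PySem.Set Int) (L : List Int) (x : Int) :
    x ∈ L.filter (fun y => !V.contains y) ↔ x ∈ L ∧ x ∉ V := by
  rw [List.mem_filter, Bool.not_eq_true', pvNotMem]

/-- Discovering `c` : reachability from `c :: rest` avoiding `V` equals reachability from
`c`'s unvisited neighbours and `rest` avoiding `V ∪ {c}`, plus `c` itself. -/
lemma pvReach_through (g : List (Int × List Int)) (V : PySem.Set Int) (c : Int)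
    (s x : Int) (h : pvReach g (fun y => V.contains y) s x) :
    pvReach g (fun y => (V.add c).contains y) s x ∨ x = c ∨
      ∃ n ∈ pvAdj g c, pvReach g (fun y => (V.add c).contains y) n x := by
  obtain ⟨hs, hr⟩ := h
  induction hr with
  | refl =>
    by_cases hsc : s = c
    · exact Or.inr (Or.inl hsc)
    · exact Or.inl ⟨(pvContains_add_false V c s).mpr ⟨hs, hsc⟩, Relation.ReflTransGen.refl⟩
  | @tail b x' hby hstep ih =>
    by_cases hxc : x' = c
    · exact Or.inr (Or.inl hxc)
    · have hx' : (V.add c).contains x' = false :=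
        (pvContains_add_false V c x').mpr ⟨hstep.1, hxc⟩
      rcases ih with hL | hE | ⟨n, hn, hre⟩
      · exact Or.inl ⟨hL.1, hL.2.tail ⟨hx', hstep.2⟩⟩
      · subst hE
        exact Or.inr (Or.inr ⟨x', hstep.2, ⟨hx', Relation.ReflTransGen.refl⟩⟩)
      · exact Or.inr (Or.inr ⟨n, hn, ⟨hre.1, hre.2.tail ⟨hx', hstep.2⟩⟩⟩)

/-- The DFS discovery step, as an iff on the visited-or-reachable set. -/
lemma pvReach_expand (g : List (Int × List Int)) (V : PySem.Set Int) (c : Int)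
    (hc : V.contains c = false) (rest : List Int) (x : Int) :
    (x ∈ V ∨ ∃ t ∈ (c :: rest), pvReach g (fun y => V.contains y) t x)
    ↔ (x ∈ V.add c ∨
        ∃ t ∈ ((pvAdj g c).filter (fun n => !(V.add c).contains n)).reverse ++ rest,
          pvReach g (fun y => (V.add c).contains y) t x) := by
  have hmono : ∀ s y, pvReach g (fun z => (V.add c).contains z) s y →
      pvReach g (fun z => V.contains z) s y := by
    intro s y
    exact pvReach_mono g _ _ (fun z hz => ((pvContains_add_false V c z).mp hz).1) s y
  constructor
  · rintro (hv | ⟨t, ht, hre⟩)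
    · exact Or.inl ((PySem.Set.mem_add _ _ _).mpr (Or.inl hv))
    · rcases pvReach_through g V c t x hre with hL | hE | ⟨n, hn, hre'⟩
      · rcases List.mem_cons.mp ht with hEQ | ht'
        · rw [hEQ] at hL
          have hL1 : (V.add c).contains c = false := hL.1
          rw [(pvContains_add_true V c c).mpr (Or.inr rfl)] at hL1
          cases hL1
        · exact Or.inr ⟨t, List.mem_append.mpr (Or.inr ht'), hL⟩
      · exact Or.inl ((PySem.Set.mem_add _ _ _).mpr (Or.inr hE))
      · refine Or.inr ⟨n, List.mem_append.mpr (Or.inl ?_), hre'⟩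
        rw [List.mem_reverse, List.mem_filter]
        refine ⟨hn, ?_⟩
        show (!(V.add c).contains n) = true
        rw [Bool.not_eq_true']
        exact hre'.1
  · rintro (hv | ⟨t, ht, hre⟩)
    · rcases (PySem.Set.mem_add _ _ _).mp hv with hv' | hxc
      · exact Or.inl hv'
      · refine Or.inr ⟨c, List.mem_cons_self, ?_⟩
        rw [hxc]
        exact ⟨hc, Relation.ReflTransGen.refl⟩
    · rcases List.mem_append.mp ht with hpush | hrest
      · rw [List.mem_reverse, List.mem_filter] at hpush
        refine Or.inr ⟨c, List.mem_cons_self, pvReach_head g _ c t x hc hpush.1 (hmono t x hre)⟩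
      · exact Or.inr ⟨t, List.mem_cons_of_mem _ hrest, hmono t x hre⟩

/-- Removing the freshly added `c` from the complement filter contributes exactly `c`. -/
lemma pvFilter_perm (L : List Int) (V : PySem.Set Int) (c : Int) (hL : L.Nodup)
    (hcL : c ∈ L) (hcV : V.contains c = false) :
    (L.filter (fun x => !V.contains x)).Perm
      (c :: L.filter (fun x => !(V.add c).contains x)) := by
  refine (List.perm_ext_iff_of_nodup (hL.filter _) ?_).mpr ?_
  · refine List.nodup_cons.mpr ⟨?_, hL.filter _⟩
    intro hcmem
    have hthis : (!(V.add c).contains c) = true := (List.mem_filter.mp hcmem).2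
    rw [Bool.not_eq_true'] at hthis
    rw [(pvContains_add_true V c c).mpr (Or.inr rfl)] at hthis
    cases hthis
  · intro x
    rw [pvFilterMem, List.mem_cons]
    constructor
    · rintro ⟨hxL, hxV⟩
      by_cases hxc : x = c
      · exact Or.inl hxc
      · refine Or.inr ?_
        rw [List.mem_filter]
        refine ⟨hxL, ?_⟩
        simp only [Bool.not_eq_true']
        exact (pvContains_add_false V c x).mpr ⟨(pvNotMem V x).mpr hxV, hxc⟩
    · rintro (rfl | hx)
      · exact ⟨hcL, (pvNotMem V x).mp hcV⟩
      · rw [List.mem_filter] at hx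
        have hx2 : (!(V.add c).contains x) = true := hx.2
        rw [Bool.not_eq_true'] at hx2
        have := (pvContains_add_false V c x).mp hx2
        exact ⟨hx.1, (pvNotMem V x).mp this.1⟩

/-- Characterisation of A's stack loop: it returns the visited set enlarged by everything
reachable from the stack through unvisited nodes, and adds exactly those nodes' debts. -/
lemma dfs_char (g : List (Int × List Int)) (dept : List Int) (visited : PySem.Set Int)
    (stack : List Int) (csum : Int) (hS : ∀ x ∈ stack, x ∈ pvNodes g)
    (hnd : visited.Nodup) :
    (calcDfs g dept visited stack csum hS).1.Nodup ∧
    (∀ x, x ∈ (calcDfs g dept visited stack csum hS).1 ↔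
      x ∈ visited ∨ ∃ t ∈ stack, pvReach g (fun y => visited.contains y) t x) ∧
    (calcDfs g dept visited stack csum hS).2 = csum +
      (((calcDfs g dept visited stack csum hS).1.filter
        (fun x => !visited.contains x)).map (pvDept dept)).sum := by
  revert hnd
  fun_induction calcDfs g dept visited stack csum hS with
  | case1 visited csum hS' hS'' =>
    intro hnd
    refine ⟨hnd, ?_, ?_⟩
    · intro x
      constructor
      · exact fun h => Or.inl h
      · rintro (h | ⟨t, ht, _⟩)
        · exact h
        · cases ht
    · have hfil : visited.filter (fun x => !visited.contains x) = [] := by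
        refine List.filter_eq_nil_iff.mpr ?_
        intro x hx
        show ¬ (!visited.contains x) = true
        rw [Bool.not_eq_true', pvNotMem]
        exact fun h => h hx
      rw [hfil]
      simp
  | case2 visited csum current rest hS h hS' ih =>
    intro hnd
    obtain ⟨ih1, ih2, ih3⟩ := ih hnd
    refine ⟨ih1, ?_, ih3⟩
    intro x
    rw [ih2 x]
    constructor
    · rintro (hv | ⟨t, ht, hre⟩)
      · exact Or.inl hv
      · exact Or.inr ⟨t, List.mem_cons_of_mem _ ht, hre⟩
    · rintro (hv | ⟨t, ht, hre⟩)
      · exact Or.inl hv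
      · rcases List.mem_cons.mp ht with rfl | ht'
        · have h1 : visited.contains t = false := hre.1
          rw [h] at h1; cases h1
        · exact Or.inr ⟨t, ht', hre⟩
  | case3 visited csum current rest hS h hS' ih =>
    intro hnd
    have hc : visited.contains current = false := by
      cases hcv : visited.contains current
      · rfl
      · exact absurd hcv h
    have hnd' : (visited.add current).Nodup := PySem.Set.nodup_add visited current hnd
    obtain ⟨ih1, ih2, ih3⟩ := ih hnd'
    refine ⟨ih1, ?_, ?_⟩
    · intro x
      rw [ih2 x, ← pvReach_expand g visited current hc rest x]
    · have hcmem := (ih2 current).mpr (Or.inl ((PySem.Set.mem_add _ _ _).mpr (Or.inr rfl)))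
      have hperm := pvFilter_perm _ visited current ih1 hcmem hc
      have hsum := (hperm.map (pvDept dept)).sum_eq
      rw [List.map_cons, List.sum_cons] at hsum
      rw [ih3, hsum]
      ring

/-- Completeness of one frontier expansion: anything reachable from the old frontier is
already collected or reachable from the new frontier. -/
lemma bfs_step_complete (g : List (Int × List Int)) (visited : PySem.Set Int)
    (comp comp' frontier frontier' : List Int)
    (hcc : ∀ x, x ∈ comp' ↔ x ∈ comp ∨ x ∈ frontier)
    (hfr : ∀ v, v ∈ frontier' ↔
      (∃ u ∈ frontier, v ∈ pvAdj g u) ∧ v ∉ comp' ∧ visited.contains v = false)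
    (hclo : ∀ x ∈ comp, ∀ v ∈ pvAdj g x, visited.contains v = false → v ∈ comp ∨ v ∈ frontier)
    (t x : Int) (ht : t ∈ frontier)
    (h : pvReach g (fun y => visited.contains y) t x) :
    x ∈ comp' ∨ ∃ t' ∈ frontier', pvReach g (fun y => visited.contains y) t' x := by
  obtain ⟨hs, hr⟩ := h
  induction hr with
  | refl => exact Or.inl ((hcc t).mpr (Or.inr ht))
  | @tail b x' hby hstep ih =>
    rcases ih with hL | ⟨t', ht', hre⟩
    · by_cases hxc : x' ∈ comp'
      · exact Or.inl hxc
      · rcases (hcc b).mp hL with hyc | hyf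
        · rcases hclo b hyc x' hstep.2 hstep.1 with h1 | h1
          · exact absurd ((hcc x').mpr (Or.inl h1)) hxc
          · exact absurd ((hcc x').mpr (Or.inr h1)) hxc
        · exact Or.inr ⟨x', (hfr x').mpr ⟨⟨b, hyf, hstep.2⟩, hxc, hstep.1⟩,
            ⟨hstep.1, Relation.ReflTransGen.refl⟩⟩
    · exact Or.inr ⟨t', ht', ⟨hre.1, hre.2.tail hstep⟩⟩

/-- Characterisation of B's frontier loop: it returns the component enlarged by everything
reachable from the frontier through unvisited nodes. -/
lemma bfs_char (g : List (Int × List Int)) (visited : PySem.Set Int)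
    (comp frontier : PySem.Set Int)
    (hF : ∀ x ∈ frontier, x ∈ pvNodes g) (hd : ∀ x ∈ frontier, x ∉ comp)
    (hnd : comp.Nodup)
    (h1 : ∀ x ∈ comp, visited.contains x = false)
    (h2 : ∀ x ∈ frontier, visited.contains x = false)
    (hclo : ∀ x ∈ comp, ∀ v ∈ pvAdj g x, visited.contains v = false →
      v ∈ comp ∨ v ∈ frontier) :
    (bfsLoop g visited comp frontier hF hd).Nodup ∧
    (∀ x, x ∈ bfsLoop g visited comp frontier hF hd ↔
      x ∈ comp ∨ ∃ t ∈ frontier, pvReach g (fun y => visited.contains y) t x) := by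
  revert hnd h1 h2 hclo
  fun_induction bfsLoop g visited comp frontier hF hd with
  | case1 comp hF0 hd0 hF1 hd1 =>
    intro hnd h1 h2 hclo
    refine ⟨hnd, ?_⟩
    intro x; simp
  | case2 comp c rest hF hd hF' hd' ih =>
    intro hnd h1 h2 hclo
    have hmemf : ∀ v, v ∈ PySem.Set.ofList (((c :: rest).flatMap (pvAdj g)).filter
        (fun v => !(PySem.Set.update comp (c :: rest)).contains v && !visited.contains v)) ↔
        (∃ u ∈ (c :: rest), v ∈ pvAdj g u) ∧
          v ∉ PySem.Set.update comp (c :: rest) ∧ visited.contains v = false := by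
      intro v
      constructor
      · intro hv
        have h' := List.mem_filter.mp ((PySem.Set.mem_ofList _ _).mp hv)
        have hb := h'.2
        simp only [Bool.and_eq_true, Bool.not_eq_true'] at hb
        exact ⟨List.mem_flatMap.mp h'.1, (pvNotMem _ _).mp hb.1, hb.2⟩
      · rintro ⟨⟨u, hu, hadj⟩, hnc, hnv⟩
        refine (PySem.Set.mem_ofList _ _).mpr (List.mem_filter.mpr
          ⟨List.mem_flatMap.mpr ⟨u, hu, hadj⟩, ?_⟩)
        simp only [Bool.and_eq_true, Bool.not_eq_true']
        exact ⟨(pvNotMem _ _).mpr hnc, hnv⟩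
    have hcc : ∀ x, x ∈ PySem.Set.update comp (c :: rest) ↔ x ∈ comp ∨ x ∈ (c :: rest) :=
      fun x => PySem.Set.mem_update comp (c :: rest) x
    obtain ⟨ih1, ih2⟩ := ih (PySem.Set.nodup_update comp (c :: rest) hnd)
      (by
        intro x hx
        rcases (hcc x).mp hx with h | h
        · exact h1 x h
        · exact h2 x h)
      (by
        intro x hx
        exact ((hmemf x).mp hx).2.2)
      (by
        intro x hx v hv hvv
        rcases (hcc x).mp hx with hxc | hxf
        · rcases hclo x hxc v hv hvv with h' | h'
          · exact Or.inl ((hcc v).mpr (Or.inl h'))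
          · exact Or.inl ((hcc v).mpr (Or.inr h'))
        · by_cases hvc : v ∈ PySem.Set.update comp (c :: rest)
          · exact Or.inl hvc
          · exact Or.inr ((hmemf v).mpr ⟨⟨x, hxf, hv⟩, hvc, hvv⟩))
    refine ⟨ih1, ?_⟩
    intro x
    rw [ih2 x]
    constructor
    · rintro (hcp | ⟨t', ht', hre⟩)
      · rcases (hcc x).mp hcp with h | h
        · exact Or.inl h
        · exact Or.inr ⟨x, h, ⟨h2 x h, Relation.ReflTransGen.refl⟩⟩
      · rcases ((hmemf t').mp ht').1 with ⟨u, hu, hadj⟩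
        exact Or.inr ⟨u, hu, pvReach_head g _ u t' x (h2 u hu) hadj hre⟩
    · rintro (hcp | ⟨t, ht, hre⟩)
      · exact Or.inl ((hcc x).mpr (Or.inl hcp))
      · exact bfs_step_complete g visited comp (PySem.Set.update comp (c :: rest))
          (c :: rest) _ hcc hmemf hclo t x ht hre

lemma pvContains_congr (s t : PySem.Set Int) (h : ∀ x, x ∈ s ↔ x ∈ t) :
    ∀ x, s.contains x = t.contains x := by
  intro x
  cases hs : s.contains x
  · cases ht : t.contains x
    · rfl
    · exact absurd ((PySem.Set.contains_iff _ _).mpr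
        ((h x).mpr ((PySem.Set.contains_iff _ _).mp ht)))
        (by rw [hs]; exact Bool.false_ne_true)
  · exact ((PySem.Set.contains_iff _ _).mpr
      ((h x).mp ((PySem.Set.contains_iff _ _).mp hs))).symm

/-- The two per-friend component branches agree and hand membership-equal visited sets on. -/
lemma comp_branch_eq (g : List (Int × List Int)) (dept : List Int) (fs : List Int)
    (ihfun : ∀ vA' vB', vA'.Nodup → vB'.Nodup →
      (∀ x, vA'.contains x = vB'.contains x) →
      calcLoop g dept fs vA' = calcLoopB g dept fs vB')
    (vA vB : PySem.Set Int) (hndA : vA.Nodup) (hndB : vB.Nodup)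
    (hEq : ∀ x, vA.contains x = vB.contains x)
    (f : Int) (hfB : vB.contains f = false)
    (hS : ∀ x ∈ [f], x ∈ pvNodes g)
    (hF : ∀ x ∈ PySem.Set.ofList [f], x ∈ pvNodes g)
    (hd : ∀ x ∈ PySem.Set.ofList [f], x ∉ (PySem.Set.empty : PySem.Set Int)) :
    (if (calcDfs g dept vA [f] 0 hS).2 ≠ 0 then false
     else calcLoop g dept fs (calcDfs g dept vA [f] 0 hS).1) =
    (if ((bfsLoop g vB PySem.Set.empty (PySem.Set.ofList [f]) hF hd).map (pvDept dept)).sum ≠ 0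
     then false
     else calcLoopB g dept fs
       (PySem.Set.update vB (bfsLoop g vB PySem.Set.empty (PySem.Set.ofList [f]) hF hd))) := by
  have hfA : vA.contains f = false := by rw [hEq f]; exact hfB
  have hfun : (fun y => vA.contains y) = (fun y => vB.contains y) := funext hEq
  have hmemAB : ∀ x, x ∈ vA ↔ x ∈ vB := by
    intro x
    rw [← PySem.Set.contains_iff, ← PySem.Set.contains_iff, hEq x]
  obtain ⟨hA1, hA2, hA3⟩ := dfs_char g dept vA [f] 0 hS hndA
  obtain ⟨hB1, hB2⟩ := bfs_char g vB PySem.Set.empty (PySem.Set.ofList [f]) hF hd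
    List.nodup_nil
    (fun x hx => absurd hx List.not_mem_nil)
    (fun x hx => by
      rw [PySem.Set.mem_ofList, List.mem_singleton] at hx
      rw [hx]; exact hfB)
    (fun x hx => absurd hx List.not_mem_nil)
  have hreachA : ∀ x, x ∈ (calcDfs g dept vA [f] 0 hS).1 ↔
      x ∈ vA ∨ pvReach g (fun y => vA.contains y) f x := by
    intro x
    rw [hA2 x]
    constructor
    · rintro (h | ⟨t, ht, hre⟩)
      · exact Or.inl h
      · rw [List.mem_singleton] at ht; rw [ht] at hre; exact Or.inr hre
    · rintro (h | hre)
      · exact Or.inl h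
      · exact Or.inr ⟨f, List.mem_singleton.mpr rfl, hre⟩
  have hreachB : ∀ x, x ∈ bfsLoop g vB PySem.Set.empty (PySem.Set.ofList [f]) hF hd ↔
      pvReach g (fun y => vA.contains y) f x := by
    intro x
    rw [hB2 x, hfun]
    constructor
    · rintro (h | ⟨t, ht, hre⟩)
      · exact absurd h List.not_mem_nil
      · rw [PySem.Set.mem_ofList, List.mem_singleton] at ht
        rw [ht] at hre; exact hre
    · intro hre
      exact Or.inr ⟨f, (PySem.Set.mem_ofList _ _).mpr (List.mem_singleton.mpr rfl), hre⟩
  have hpartA : ∀ x, x ∈ (calcDfs g dept vA [f] 0 hS).1.filter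
      (fun x => !vA.contains x) ↔ pvReach g (fun y => vA.contains y) f x := by
    intro x
    rw [pvFilterMem, hreachA x]
    constructor
    · rintro ⟨h | hre, hnv⟩
      · exact absurd h hnv
      · exact hre
    · intro hre
      exact ⟨Or.inr hre, (pvNotMem vA x).mp (pvReach_target g _ f x hre)⟩
  have hperm : ((calcDfs g dept vA [f] 0 hS).1.filter (fun x => !vA.contains x)).Perm
      (bfsLoop g vB PySem.Set.empty (PySem.Set.ofList [f]) hF hd) := by
    refine (List.perm_ext_iff_of_nodup (hA1.filter _) hB1).mpr ?_
    intro x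
    rw [hpartA x, hreachB x]
  have hsum : (calcDfs g dept vA [f] 0 hS).2 =
      ((bfsLoop g vB PySem.Set.empty (PySem.Set.ofList [f]) hF hd).map (pvDept dept)).sum := by
    rw [hA3, (hperm.map (pvDept dept)).sum_eq]; ring
  rw [hsum]
  by_cases hz : ((bfsLoop g vB PySem.Set.empty (PySem.Set.ofList [f]) hF hd).map
      (pvDept dept)).sum ≠ 0
  · rw [if_pos hz, if_pos hz]
  · rw [if_neg hz, if_neg hz]
    refine ihfun _ _ hA1
      (PySem.Set.nodup_update vB _ hndB)
      (pvContains_congr _ _ ?_)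
    intro x
    rw [hreachA x, PySem.Set.mem_update, hreachB x, hmemAB x]

/-- The two outer loops agree whenever their visited sets have the same members. -/
lemma outer_eq (g : List (Int × List Int)) (dept : List Int) :
    ∀ (friends : List Int) (vA vB : PySem.Set Int), vA.Nodup → vB.Nodup →
    (∀ x, vA.contains x = vB.contains x) →
    calcLoop g dept friends vA = calcLoopB g dept friends vB := by
  intro friends
  induction friends with
  | nil => intro vA vB _ _ _; rfl
  | cons f fs ih =>
    intro vA vB hndA hndB hEq
    rw [calcLoop, calcLoopB, hEq f]
    by_cases hvf : vB.contains f = true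
    · rw [if_pos hvf, if_pos hvf]
      exact ih vA vB hndA hndB hEq
    · rw [if_neg hvf, if_neg hvf]
      have hfB : vB.contains f = false := by
        cases h : vB.contains f
        · rfl
        · exact absurd h hvf
      by_cases hgf : (PySem.Dict.mk g).contains f = true
      · rw [dif_pos hgf, dif_pos hgf]
        exact comp_branch_eq g dept fs ih vA vB hndA hndB hEq f hfB _ _ _
      · rw [dif_neg hgf, dif_neg hgf]
        by_cases hdf : pvDept dept f ≠ 0
        · rw [if_pos hdf, if_pos hdf]
        · rw [if_neg hdf, if_neg hdf]
          exact ih vA vB hndA hndB hEq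

theorem calc_py_spec : Claim_equal_calc_py := by
  intro graph dept friends_num _ _
  unfold Spec_calc_py calc_py calc_py_alt
  exact outer_eq graph dept (PySem.List.pyRange 0 friends_num 1)
    PySem.Set.empty PySem.Set.empty List.nodup_nil List.nodup_nil (fun _ => rfl)
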